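-- pv_equiv track=rewrite | github.com/Yuvraj-Jaiswal/Advance-Dyanamic-Programming | String Replacement DP.py | str_rep
-- ===== SOURCE A (Python) =====
-- def str_rep(st,dt,i=0,res=""):
--     if i >= len(st) :
--         is_same = "YES"
--         for i in range(len(res)-1):
--             if res[i]!=res[i-1]:
--                 is_same = "NO"
--         return is_same
--
--     if str_rep(st,dt,i+1,res+st[i]) == "YES": return "YES"
--     if st[i] in dt:
--         if str_rep(st,dt,i+1,res+dt[st[i]]) == "YES": return "YES"
--     else:
--         if str_rep(st, dt, i + 1, res + st[i]) == "YES": return "YES"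
--     return "NO"
-- ===== SOURCE B (Python) =====
-- def _piece_ok(ch, c, dt):
--     # position with character ch can contribute a piece made only of c
--     if ch == c:
--         return True
--     r = dt.get(ch)
--     return r is not None and all(x == c for x in r)
--
--
-- def _first_constraint(chars, dt):
--     # first position that cannot contribute an empty piece; its at most two
--     # possible uniform characters are the only candidate targets
--     for ch in chars:
--         r = dt.get(ch)
--         if r == "":
--             continue
--         return [ch] + ([r[0]] if r is not None else [])
--     return None
--
--
-- def str_rep(st, dt, i=0, res=""):
--     rl = list(res)
--     chars = [st[p] for p in range(i, len(st))]
--     if rl: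
--         if any(ch != rl[0] for ch in rl):
--             return "NO"
--         cands = [rl[0]]
--     else:
--         cands = _first_constraint(chars, dt)
--         if cands is None:
--             return "YES"
--     for c in cands:
--         if all(_piece_ok(ch, c, dt) for ch in chars):
--             return "YES"
--     return "NO"
-- ===== Notes on version B (the rewrite author's own statement) =====
-- stated objective: faster
-- what changed: Replaced A's exponential try-every-replacement recursion by a direct one-pass check: the target character is forced (res[0], or one of at most two characters allowed by the first position with no empty replacement) and each candidate is tested against all positions in one scan; intended as faster (exponential -> linear) — a timing run measured B 1377x faster at the largest size both finished (n=64) and A timed out beyond that, though with too few both-finished samples for mechanical confirmation.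
import Mathlib
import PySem

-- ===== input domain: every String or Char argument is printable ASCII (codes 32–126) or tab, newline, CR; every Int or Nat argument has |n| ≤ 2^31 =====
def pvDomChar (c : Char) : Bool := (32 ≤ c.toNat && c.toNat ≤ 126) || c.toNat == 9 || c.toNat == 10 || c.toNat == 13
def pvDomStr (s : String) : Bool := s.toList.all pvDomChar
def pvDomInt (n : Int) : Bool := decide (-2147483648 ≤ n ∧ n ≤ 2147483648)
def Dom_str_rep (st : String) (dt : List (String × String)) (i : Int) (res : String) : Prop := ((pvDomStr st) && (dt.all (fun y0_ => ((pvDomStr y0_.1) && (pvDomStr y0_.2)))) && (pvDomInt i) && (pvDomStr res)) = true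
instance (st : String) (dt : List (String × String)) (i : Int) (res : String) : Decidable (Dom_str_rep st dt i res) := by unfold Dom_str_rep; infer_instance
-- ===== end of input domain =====

-- B replaces A's exponential try-every-replacement recursion by a one-pass check of at most
-- two forced candidate target characters (objective: faster; intended exponential -> linear,
-- a timing run saw A time out where B answered but had too few samples to confirm).
-- Both ports work on the List Char views of the strings (PySem convention).

-- shared helper: Python dict lookup on the association list (first match)
def dictGet (dt : List (String × String)) (k : String) : Option String :=
  match dt with
  | [] => none
  | (a, b) :: rest => if a = k then some b else dictGet rest k

-- ===== PORT A =====
-- A's base case: is_same = "YES"; for i in range(len(res)-1): if res[i] != res[i-1]: is_same = "NO"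
def strRepCheck (res : List Char) : String :=
  (PySem.List.pyRange 0 ((res.length : Int) - 1) 1).foldl
    (fun acc k =>
      if PySem.List.pyGet? res k ≠ PySem.List.pyGet? res (k - 1) then "NO" else acc)
    "YES"

-- A's recursion; pyGet? st i = none is exactly where Python raises IndexError (outside Pre_)
def strRepGo (st : List Char) (dt : List (String × String)) (i : Int) (res : List Char) : String :=
  if _h : (st.length : Int) ≤ i then strRepCheck res
  else
    match PySem.List.pyGet? st i with
    | none => ""   -- Python raises IndexError here (excluded by Pre_)
    | some c =>
      if strRepGo st dt (i + 1) (res ++ [c]) = "YES" then "YES"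
      else
        match dictGet dt (String.singleton c) with
        | some r => if strRepGo st dt (i + 1) (res ++ r.toList) = "YES" then "YES" else "NO"
        | none => if strRepGo st dt (i + 1) (res ++ [c]) = "YES" then "YES" else "NO"
  termination_by ((st.length : Int) - i).toNat
  decreasing_by all_goals omega

def str_rep (st : String) (dt : List (String × String)) (i : Int) (res : String) : String :=
  strRepGo st.toList dt i res.toList

-- ===== PORT B =====
-- _piece_ok(ch, c, dt)
def pieceOk (dt : List (String × String)) (ch c : Char) : Bool :=
  if ch = c then true
  else
    match dictGet dt (String.singleton ch) with
    | none => false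
    | some r => r.toList.all (fun x => x = c)

-- _first_constraint(chars, dt)
def firstConstraint (dt : List (String × String)) (chars : List Char) : Option (List Char) :=
  match chars with
  | [] => none
  | ch :: rest =>
    match dictGet dt (String.singleton ch) with
    | some r =>
      match r.toList with
      | [] => firstConstraint dt rest
      | x :: _ => some [ch, x]
    | none => some [ch]

-- chars = [st[p] for p in range(i, len(st))]; the getD default is unreachable under Pre_
def charsOfL (stl : List Char) (i : Int) : List Char :=
  (PySem.List.pyRange i (stl.length : Int) 1).map
    (fun p => (PySem.List.pyGet? stl p).getD 'a')

def str_rep_alt (st : String) (dt : List (String × String)) (i : Int) (res : String) : String :=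
  let chars := charsOfL st.toList i
  match res.toList with
  | c0 :: rest =>
    if (c0 :: rest).any (fun ch => ch ≠ c0) then "NO"
    else if chars.all (fun ch => pieceOk dt ch c0) then "YES" else "NO"
  | [] =>
    match firstConstraint dt chars with
    | none => "YES"
    | some cands =>
      if cands.any (fun c => chars.all (fun ch => pieceOk dt ch c)) then "YES" else "NO"

-- ===== PRECONDITION & SPEC =====
-- Pre_ excludes exactly the inputs on which A raises IndexError: a start index i below
-- -len(st) (Python's negative indexing wraps for -len ≤ i < 0; below that st[i] raises).
def Pre_str_rep (st : String) (dt : List (String × String)) (i : Int) (res : String) : Prop :=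
  -(st.toList.length : Int) ≤ i
instance (st : String) (dt : List (String × String)) (i : Int) (res : String) : Decidable (Pre_str_rep st dt i res) := by unfold Pre_str_rep; infer_instance

def pvWitness_str_rep : String × (List (String × String)) × Int × String :=
  ("aba", [("b", "a")], 0, "")

def Spec_str_rep (st : String) (dt : List (String × String)) (i : Int) (res : String) (out : String) : Prop := out = str_rep_alt st dt i res
instance (st : String) (dt : List (String × String)) (i : Int) (res : String) (out : String) : Decidable (Spec_str_rep st dt i res out) := by unfold Spec_str_rep; infer_instance

-- ===== CLAIM (what is proved, stated in full; the proofs are below) =====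
def Claim_equal_str_rep : Prop := ∀ (st : String) (dt : List (String × String)) (i : Int) (res : String), Dom_str_rep st dt i res → Pre_str_rep st dt i res → Spec_str_rep st dt i res (str_rep st dt i res)

-- ===== LEMMAS AND PROOFS =====

-- Proof-side vocabulary: A's search reaches an all-equal string iff either res is empty and
-- every remaining position has an empty replacement, or some target character c is compatible
-- with res and with one option of every remaining position.

-- all characters of l are equal
def uniB (l : List Char) : Bool :=
  match l with
  | [] => true
  | c :: t => t.all (fun x => x = c)

-- the pieces A may append for source character c
def opts (dt : List (String × String)) (c : Char) : List (List Char) :=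
  match dictGet dt (String.singleton c) with
  | some r => [[c], r.toList]
  | none => [[c]]

-- A's search problem: can the remaining choices extend res to an all-equal string?
def reachB (dt : List (String × String)) (res : List Char) (cs : List Char) : Bool :=
  match cs with
  | [] => uniB res
  | c :: cs' => (opts dt c).any (fun p => reachB dt (res ++ p) cs')

def Compat (c : Char) (l : List Char) : Prop := ∀ x ∈ l, x = c
def Flex (dt : List (String × String)) (ch : Char) : Prop :=
  ∃ r, dictGet dt (String.singleton ch) = some r ∧ r.toList = []
def Ok (dt : List (String × String)) (c ch : Char) : Prop :=
  ch = c ∨ ∃ r, dictGet dt (String.singleton ch) = some r ∧ Compat c r.toList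

theorem uniB_iff (l : List Char) :
    uniB l = true ↔ (l = [] ∨ ∃ c, l ≠ [] ∧ Compat c l) := by
  cases l with
  | nil => simp [uniB]
  | cons c t =>
    simp only [uniB, List.all_eq_true, decide_eq_true_eq, Compat]
    constructor
    · intro h; right; refine ⟨c, by simp, ?_⟩
      intro x hx
      rcases List.mem_cons.mp hx with h1 | h2
      · rw [h1]
      · exact h _ h2
    · rintro (h | ⟨c', _, hc⟩); · simp at h
      intro x hx
      rw [hc x (by simp [hx]), hc c (by simp)]


theorem pieceOk_iff (dt : List (String × String)) (ch c : Char) :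
    pieceOk dt ch c = true ↔ Ok dt c ch := by
  unfold pieceOk Ok Compat
  split_ifs with h
  · simp [h]
  · cases hd : dictGet dt (String.singleton ch) with
    | none => simp [h]
    | some r => simp [h, List.all_eq_true]


theorem firstConstraint_none_iff (dt : List (String × String)) (chars : List Char) :
    firstConstraint dt chars = none ↔ ∀ ch ∈ chars, Flex dt ch := by
  induction chars with
  | nil => simp [firstConstraint]
  | cons ch rest ih =>
    unfold firstConstraint
    cases hd : dictGet dt (String.singleton ch) with
    | none => simp [Flex, hd]
    | some r =>
      cases hr : r.toList with
      | nil =>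
        have hre : r = "" := String.toList_eq_nil_iff.mp hr
        subst hre
        simp [ih, Flex, hd]
      | cons x xs =>
        have hne : r ≠ "" := by
          intro hre; rw [hre] at hr; simp at hr
        simp only [hr]
        simp [Flex, hd, hne]


theorem firstConstraint_some (dt : List (String × String)) (chars : List Char)
    (cands : List Char) (h : firstConstraint dt chars = some cands) :
    ∃ ch₀ ∈ chars, ∀ c, Ok dt c ch₀ → c ∈ cands := by
  induction chars with
  | nil => simp [firstConstraint] at h
  | cons ch rest ih =>
    cases hd : dictGet dt (String.singleton ch) with
    | none =>
      simp only [firstConstraint, hd] at h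
      refine ⟨ch, by simp, ?_⟩
      rintro c (rfl | ⟨r, hr, _⟩)
      · simp at h; simp [← h]
      · rw [hd] at hr; exact absurd hr (by simp)
    | some r =>
      cases hr : r.toList with
      | nil =>
        simp only [firstConstraint, hd, hr] at h
        obtain ⟨ch₀, hmem, hok⟩ := ih h
        exact ⟨ch₀, by simp [hmem], hok⟩
      | cons x xs =>
        simp only [firstConstraint, hd, hr] at h
        refine ⟨ch, by simp, ?_⟩
        rintro c (rfl | ⟨r', hr', hcomp⟩)
        · simp at h; simp [← h]
        · rw [hd] at hr'; injection hr' with hrr; subst hrr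
          have : x = c := hcomp x (by simp [hr])
          simp at h; simp [← h, this]

theorem compat_append (c : Char) (l1 l2 : List Char) :
    Compat c (l1 ++ l2) ↔ Compat c l1 ∧ Compat c l2 := by
  unfold Compat; constructor
  · intro h; exact ⟨fun x hx => h x (by simp [hx]), fun x hx => h x (by simp [hx])⟩
  · rintro ⟨h1, h2⟩ x hx
    rcases List.mem_append.mp hx with h | h
    · exact h1 x h
    · exact h2 x h


theorem reachB_iff (dt : List (String × String)) (cs : List Char) (rl : List Char) :
    reachB dt rl cs = true ↔
      ((rl = [] ∧ ∀ ch ∈ cs, Flex dt ch) ∨ ∃ c, Compat c rl ∧ ∀ ch ∈ cs, Ok dt c ch) := by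
  induction cs generalizing rl with
  | nil =>
    simp only [reachB, List.not_mem_nil, false_implies, implies_true, and_true]
    rw [uniB_iff]
    constructor
    · rintro (rfl | ⟨c, _, hc⟩)
      · exact Or.inl rfl
      · exact Or.inr ⟨c, hc⟩
    · rintro (rfl | ⟨c, hc⟩)
      · exact Or.inl rfl
      · cases rl with
        | nil => exact Or.inl rfl
        | cons a t => exact Or.inr ⟨c, by simp, hc⟩
  | cons ch cs' ih =>
    simp only [reachB, List.any_eq_true]
    constructor
    · rintro ⟨p, hp, hr⟩
      rcases (ih (rl ++ p)).mp hr with ⟨hnil, hflex⟩ | ⟨c, hcomp, hok⟩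
      · -- rl ++ p = [], so rl = [] and p = []
        rcases List.append_eq_nil_iff.mp hnil with ⟨hrl, hpnil⟩
        subst hrl hpnil
        -- p = [] ∈ opts dt ch means the dict piece is empty (a singleton is nonempty)
        left
        refine ⟨rfl, ?_⟩
        intro x hx
        rcases List.mem_cons.mp hx with h1 | h2
        · subst h1
          unfold opts at hp
          cases hd : dictGet dt (String.singleton x) with
          | none => rw [hd] at hp; simp at hp
          | some r =>
            rw [hd] at hp; simp at hp
            exact ⟨r, hd, by simp [hp]⟩
        · exact hflex x h2
      · right
        rcases (compat_append c rl p).mp hcomp with ⟨hcrl, hcp⟩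
        refine ⟨c, hcrl, ?_⟩
        intro x hx
        rcases List.mem_cons.mp hx with h1 | h2
        · subst h1
          unfold opts at hp
          cases hd : dictGet dt (String.singleton x) with
          | none =>
            rw [hd] at hp; simp at hp; subst hp
            exact Or.inl (hcp x (by simp))
          | some r =>
            rw [hd] at hp; simp at hp
            rcases hp with h | h
            · subst h; exact Or.inl (hcp x (by simp))
            · subst h; exact Or.inr ⟨r, hd, hcp⟩
        · exact hok x h2
    · rintro (⟨hrl, hflex⟩ | ⟨c, hcomp, hok⟩)
      · subst hrl
        obtain ⟨r, hd, hre⟩ := hflex ch (by simp)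
        refine ⟨r.toList, ?_, ?_⟩
        · unfold opts; rw [hd]; simp
        · apply (ih _).mpr
          left
          exact ⟨by simp [hre], fun x hx => hflex x (by simp [hx])⟩
      · rcases hok ch (by simp) with h1 | ⟨r, hd, hcr⟩
        · -- ch = c: choose the singleton piece
          refine ⟨[ch], by unfold opts; cases dictGet dt (String.singleton ch) <;> simp, ?_⟩
          apply (ih _).mpr
          right
          refine ⟨c, (compat_append c rl [ch]).mpr ⟨hcomp, by simp [Compat, h1]⟩,
            fun x hx => hok x (by simp [hx])⟩
        · -- the dict piece is all c
          refine ⟨r.toList, by unfold opts; rw [hd]; simp, ?_⟩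
          apply (ih _).mpr
          right
          exact ⟨c, (compat_append c rl r.toList).mpr ⟨hcomp, hcr⟩,
            fun x hx => hok x (by simp [hx])⟩

theorem foldl_no (C : Int → Prop) [DecidablePred C] (l : List Int) (a : String) :
    l.foldl (fun acc k => if C k then "NO" else acc) a
      = if l.any (fun k => decide (C k)) then "NO" else a := by
  induction l generalizing a with
  | nil => simp
  | cons k t ih =>
    simp only [List.foldl_cons, List.any_cons]
    by_cases h : C k <;> simp [h, ih]


theorem allEq_iff (l : List Char) :
    (∀ j < l.length, l[j]? = l[0]?) ↔ uniB l = true := by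
  cases l with
  | nil => simp [uniB]
  | cons c t =>
    simp only [uniB, List.all_eq_true, decide_eq_true_eq]
    constructor
    · intro h x hx
      obtain ⟨m, hm, rfl⟩ := List.mem_iff_getElem.mp hx
      have h2 := h (m + 1) (by simp; omega)
      rw [List.getElem?_cons_succ, List.getElem?_cons_zero, List.getElem?_eq_getElem hm] at h2
      exact Option.some.inj h2
    · intro h j hj
      cases j with
      | zero => rfl
      | succ m =>
        simp only [List.getElem?_cons_succ, List.getElem?_cons_zero]
        have hm : m < t.length := by simpa using hj
        rw [List.getElem?_eq_getElem hm]
        exact congrArg some (h _ (List.getElem_mem hm))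


theorem cond_iff (l : List Char) :
    (∀ k : Int, 0 ≤ k → k < (l.length : Int) - 1 →
        PySem.List.pyGet? l k = PySem.List.pyGet? l (k - 1))
      ↔ uniB l = true := by
  rcases Nat.lt_or_ge l.length 2 with hn | hn
  · constructor
    · intro _
      rw [← allEq_iff]
      intro j hj
      have : j = 0 := by omega
      subst this
      rfl
    · intro _ k hk1 hk2; omega
  · rw [← allEq_iff]
    have hlast : PySem.List.pyGet? l (-1) = l[l.length - 1]? := by
      rw [PySem.List.pyGet?_neg_one, List.getLast?_eq_getElem?]
    constructor
    · intro P
      -- first all indices ≤ n-2 equal index 0, by induction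
      have chain : ∀ j : Nat, j ≤ l.length - 2 → l[j]? = l[0]? := by
        intro j
        induction j with
        | zero => intro _; rfl
        | succ m ih =>
          intro hm
          have hP := P ((m : Int) + 1) (by omega) (by omega)
          have h1 : PySem.List.pyGet? l ((m : Int) + 1) = l[m + 1]? := by
            rw [show ((m : Int) + 1) = ((m + 1 : Nat) : Int) by omega,
              PySem.List.pyGet?_natCast]
          have h2 : PySem.List.pyGet? l ((m : Int) + 1 - 1) = l[m]? := by
            rw [show ((m : Int) + 1 - 1) = ((m : Nat) : Int) by omega,
              PySem.List.pyGet?_natCast]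
          rw [h1, h2] at hP
          rw [hP]; exact ih (by omega)
      have hlast0 : l[l.length - 1]? = l[0]? := by
        have hP := P 0 (by omega) (by omega)
        rw [PySem.List.pyGet?_zero, show (0 : Int) - 1 = -1 by ring, hlast] at hP
        exact hP.symm
      intro j hj
      rcases Nat.lt_or_ge j (l.length - 1) with h | h
      · exact chain j (by omega)
      · have : j = l.length - 1 := by omega
        rw [this]; exact hlast0
    · intro h k hk1 hk2
      rcases eq_or_lt_of_le hk1 with rfl | hk
      · rw [PySem.List.pyGet?_zero, show (0 : Int) - 1 = -1 by ring, hlast,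
          h (l.length - 1) (by omega), h 0 (by omega)]
      · have hkn : PySem.List.pyGet? l k = l[k.toNat]? := PySem.List.pyGet?_of_nonneg l hk1
        have hkn' : PySem.List.pyGet? l (k - 1) = l[(k - 1).toNat]? :=
          PySem.List.pyGet?_of_nonneg l (by omega)
        rw [hkn, hkn', h k.toNat (by omega), h (k - 1).toNat (by omega)]


theorem strRepCheck_eq (l : List Char) :
    strRepCheck l = if uniB l then "YES" else "NO" := by
  unfold strRepCheck
  rw [foldl_no (fun k => PySem.List.pyGet? l k ≠ PySem.List.pyGet? l (k - 1))]
  rcases h : uniB l with _ | _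
  · -- uniB false: some k in range with inequality
    have : ¬ (∀ k : Int, 0 ≤ k → k < (l.length : Int) - 1 →
        PySem.List.pyGet? l k = PySem.List.pyGet? l (k - 1)) := by
      rw [cond_iff]; simp [h]
    push_neg at this
    obtain ⟨k, hk1, hk2, hne⟩ := this
    have hany : (PySem.List.pyRange 0 ((l.length : Int) - 1) 1).any
        (fun k => decide (PySem.List.pyGet? l k ≠ PySem.List.pyGet? l (k - 1))) = true := by
      simp only [List.any_eq_true, PySem.List.mem_pyRange_one, decide_eq_true_eq]
      exact ⟨k, ⟨hk1, hk2⟩, hne⟩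
    rw [hany]
    simp
  · -- uniB true: no mismatch anywhere in the range
    have hall := (cond_iff l).mpr h
    have hany : (PySem.List.pyRange 0 ((l.length : Int) - 1) 1).any
        (fun k => decide (PySem.List.pyGet? l k ≠ PySem.List.pyGet? l (k - 1))) = false := by
      simp only [List.any_eq_false, PySem.List.mem_pyRange_one, decide_eq_true_eq]
      intro k hk
      simp [hall k hk.1 hk.2]
    rw [hany]
    simp

theorem charsOfL_nil (stl : List Char) (i : Int) (h : (stl.length : Int) ≤ i) :
    charsOfL stl i = [] := by
  unfold charsOfL; rw [PySem.List.pyRange_one_eq_nil h]; rfl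


theorem charsOfL_cons (stl : List Char) (i : Int) (h : i < (stl.length : Int)) :
    charsOfL stl i = ((PySem.List.pyGet? stl i).getD 'a') :: charsOfL stl (i + 1) := by
  unfold charsOfL; rw [PySem.List.pyRange_one_cons h]; rfl


theorem strRepGo_eq_aux (st : List Char) (dt : List (String × String)) :
    ∀ n (i : Int) (res : List Char), n = ((st.length : Int) - i).toNat →
      -(st.length : Int) ≤ i →
      strRepGo st dt i res = if reachB dt res (charsOfL st i) then "YES" else "NO" := by
  intro n
  induction n using Nat.strong_induction_on with
  | _ n ih =>
    intro i res hn hpre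
    by_cases hlen : (st.length : Int) ≤ i
    · rw [strRepGo, dif_pos hlen, charsOfL_nil st i hlen, strRepCheck_eq]
      rfl
    · push_neg at hlen
      have hsome : PySem.List.pyGet? st i ≠ none := by
        intro hnone
        rw [PySem.List.pyGet?_eq_none_iff] at hnone
        exact hnone ⟨by omega, by omega⟩
      obtain ⟨c, hc⟩ := Option.ne_none_iff_exists'.mp hsome
      have hih : ∀ res' : List Char,
          strRepGo st dt (i + 1) res'
            = if reachB dt res' (charsOfL st (i + 1)) then "YES" else "NO" := by
        intro res'
        exact ih (((st.length : Int) - (i + 1)).toNat) (by omega) (i + 1) res' rfl (by omega)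
      cases hd : dictGet dt (String.singleton c) with
      | none =>
        rw [strRepGo, dif_neg (by omega), hc]
        rw [charsOfL_cons st i hlen, hc]
        simp only [Option.getD_some, reachB, opts, hd, List.any_cons, List.any_nil,
          Bool.or_false]
        rw [hih]
        by_cases hr : reachB dt (res ++ [c]) (charsOfL st (i + 1)) <;> simp [hr]
      | some r =>
        rw [strRepGo, dif_neg (by omega), hc]
        rw [charsOfL_cons st i hlen, hc]
        simp only [Option.getD_some, reachB, opts, hd, List.any_cons, List.any_nil,
          Bool.or_false]
        rw [hih, hih]
        by_cases hr1 : reachB dt (res ++ [c]) (charsOfL st (i + 1)) <;>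
          by_cases hr2 : reachB dt (res ++ r.toList) (charsOfL st (i + 1)) <;>
          simp [hr1, hr2]

theorem str_rep_alt_eq (st : String) (dt : List (String × String)) (i : Int) (res : String) :
    str_rep_alt st dt i res =
      if reachB dt res.toList (charsOfL st.toList i) then "YES" else "NO" := by
  set chars := charsOfL st.toList i with hchars
  cases hres : res.toList with
  | nil =>
    simp only [str_rep_alt, hres]
    cases hfc : firstConstraint dt chars with
    | none =>
      have hre : reachB dt [] chars = true :=
        (reachB_iff dt chars []).mpr (Or.inl ⟨rfl, (firstConstraint_none_iff dt chars).mp hfc⟩)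
      rw [← hchars, hre]
      rfl
    | some cands =>
      have hbool : (cands.any fun c => chars.all fun ch => pieceOk dt ch c)
          = reachB dt [] chars := by
        rcases hb : reachB dt [] chars with _ | _
        · rw [List.any_eq_false]
          intro c hc hall
          apply absurd hb
          rw [Bool.not_eq_false, reachB_iff]
          right
          refine ⟨c, by simp [Compat], ?_⟩
          intro ch hch
          exact (pieceOk_iff dt ch c).mp (List.all_eq_true.mp hall ch hch)
        · rcases (reachB_iff dt chars []).mp hb with ⟨_, hflex⟩ | ⟨c, _, hok⟩
          · exact absurd ((firstConstraint_none_iff dt chars).mpr hflex) (by simp [hfc])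
          · obtain ⟨ch₀, hmem, hcand⟩ := firstConstraint_some dt chars cands hfc
            rw [List.any_eq_true]
            refine ⟨c, hcand c (hok ch₀ hmem), ?_⟩
            rw [List.all_eq_true]
            intro ch hch
            exact (pieceOk_iff dt ch c).mpr (hok ch hch)
      rw [← hchars, ← hbool]
  | cons c0 rest =>
    simp only [str_rep_alt, hres, ← hchars]
    rcases hany : (c0 :: rest).any (fun ch => decide (ch ≠ c0)) with _ | _
    · -- res uniform
      have hcomp : Compat c0 (c0 :: rest) := by
        intro x hx
        have h2 : ¬ (x ≠ c0) := by
          have h3 := (List.any_eq_false.mp hany) x hx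
          simpa using h3
        simpa using h2
      rcases hall : chars.all (fun ch => pieceOk dt ch c0) with _ | _
      · have hre : reachB dt (c0 :: rest) chars = false := by
          rw [← Bool.not_eq_true, reachB_iff]
          rintro (⟨h, _⟩ | ⟨c, hc, hok⟩)
          · simp at h
          · have hc0 : c = c0 := (hc c0 (by simp)).symm
            subst hc0
            have h4 : chars.all (fun ch => pieceOk dt ch c) = true :=
              List.all_eq_true.mpr (fun ch hch => (pieceOk_iff dt ch c).mpr (hok ch hch))
            rw [h4] at hall
            exact absurd hall (by simp)
        simp [hre]
      · have hre : reachB dt (c0 :: rest) chars = true := by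
          rw [reachB_iff]
          right
          exact ⟨c0, hcomp,
            fun ch hch => (pieceOk_iff dt ch c0).mp (List.all_eq_true.mp hall ch hch)⟩
        simp [hre]
    · -- a second character of res differs: unreachable
      have hre : reachB dt (c0 :: rest) chars = false := by
        rw [← Bool.not_eq_true, reachB_iff]
        rintro (⟨h, _⟩ | ⟨c, hcomp, _⟩)
        · simp at h
        · obtain ⟨x, hx, hne⟩ := List.any_eq_true.mp hany
          apply (by simpa using hne : x ≠ c0)
          rw [hcomp x hx, hcomp c0 (by simp)]
      simp [hre]

-- ===== VERDICT (by name: the statement is the Claim_ definition above) =====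
theorem str_rep_spec : Claim_equal_str_rep := by
  intro st dt i res _ hpre
  unfold Spec_str_rep str_rep
  rw [strRepGo_eq_aux st.toList dt (((st.toList.length : Int) - i).toNat) i res.toList rfl hpre,
    str_rep_alt_eq]
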